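-- pv_equiv track=rewrite | github.com/jungsnow/Data-Visualization---Project-2 | backend/pipeline/team_composition_db.py | remove_traits
-- ===== SOURCE A (Python) =====
-- def remove_traits(units_str):
--     """Remove units traits from text seperated by comma
--
--     Args:
--         units_str (str): traits-unit,traits-unit
--
--     Returns:
--         str: Units stripped of traits
--     """
--     if not units_str:
--         return ""
--
--     units_array = []
--     for unit in units_str.split(","):
--         units_array.append(unit.split("-")[-1])
--     units = ", ".join(units_array)
--     return units
-- ===== SOURCE B (Python) =====
-- def remove_traits(units_str):
--     """Remove units traits from text seperated by comma (single char scan)."""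
--     out = []
--     cur = []
--     for ch in units_str:
--         if ch == ",":
--             out.extend(cur)
--             out.append(", ")
--             cur = []
--         elif ch == "-":
--             cur = []
--         else:
--             cur.append(ch)
--     out.extend(cur)
--     return "".join(out)
-- ===== Notes on version B (the rewrite author's own statement) =====
-- stated objective: alternative
-- what changed: Replaces A's split-on-comma / split-on-dash / join passes with a single character-level scan that keeps an output buffer and a current-segment buffer cleared at each dash and flushed (plus ', ') at each comma.
import Mathlib
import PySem

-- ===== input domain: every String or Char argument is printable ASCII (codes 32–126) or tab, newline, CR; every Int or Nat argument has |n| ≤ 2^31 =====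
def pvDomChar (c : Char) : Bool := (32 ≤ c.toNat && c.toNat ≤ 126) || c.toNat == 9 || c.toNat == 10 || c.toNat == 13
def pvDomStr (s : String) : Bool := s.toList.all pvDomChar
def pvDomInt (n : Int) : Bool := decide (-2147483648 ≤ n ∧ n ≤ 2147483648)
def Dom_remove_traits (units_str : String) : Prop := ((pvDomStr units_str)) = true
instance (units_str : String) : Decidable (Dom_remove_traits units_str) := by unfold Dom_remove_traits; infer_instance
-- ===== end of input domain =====

-- B replaces A's split/strip/join passes with one character scan keeping an output buffer
-- and a current-segment buffer cleared at each dash (objective: alternative, same cost).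

-- ===== PORT A =====
def remove_traits (units_str : String) : String :=
  if units_str = "" then ""
  else
    let units_array := (PySem.Chars.splitOn units_str.toList [',']).foldl
      (fun acc unit => acc ++ [PySem.List.pyGetD (PySem.Chars.splitOn unit ['-']) (-1) []]) []
    String.ofList (PySem.Chars.join [',', ' '] units_array)

-- ===== PORT B =====
def pvStepB (st : List Char × List Char) (ch : Char) : List Char × List Char :=
  if ch = ',' then (st.1 ++ st.2 ++ [',', ' '], [])
  else if ch = '-' then (st.1, [])
  else (st.1, st.2 ++ [ch])

def remove_traits_alt (units_str : String) : String :=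
  let r := units_str.toList.foldl pvStepB ([], [])
  String.ofList (r.1 ++ r.2)

-- ===== PRECONDITION & SPEC =====
def Spec_remove_traits (units_str : String) (out : String) : Prop := out = remove_traits_alt units_str
instance (units_str : String) (out : String) : Decidable (Spec_remove_traits units_str out) := by unfold Spec_remove_traits; infer_instance

-- ===== CLAIM (what is proved, stated in full; the proofs are below) =====
def Claim_equal_remove_traits : Prop := ∀ (units_str : String), Dom_remove_traits units_str → Spec_remove_traits units_str (remove_traits units_str)

-- ===== LEMMAS AND PROOFS =====

/-- Recursive characterisation of `PySem.Chars.splitOn` for a one-character separator. -/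
def split1 (c : Char) : List Char → List (List Char)
  | [] => [[]]
  | x :: xs => if x = c then [] :: split1 c xs else (split1 c xs).modifyHead (x :: ·)

theorem go_single (c : Char) : ∀ (fuel : Nat) (l cur : List Char) (acc : List (List Char)),
    l.length ≤ fuel →
    PySem.Chars.splitOn.go [c] fuel l cur acc
      = acc.reverse ++ (split1 c l).modifyHead (cur.reverse ++ ·) := by
  intro fuel
  induction fuel with
  | zero =>
    intro l cur acc h
    have : l = [] := by cases l <;> simp_all
    subst this
    simp [PySem.Chars.splitOn.go, split1]
  | succ n ih =>
    intro l cur acc h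
    cases l with
    | nil => simp [PySem.Chars.splitOn.go, split1]
    | cons x rest =>
      by_cases hx : x = c
      · subst hx
        have hpre : [x].isPrefixOf (x :: rest) = true := by simp [List.isPrefixOf]
        rw [PySem.Chars.splitOn.go]
        simp only [hpre, if_true, List.length_cons, List.length_nil,
          List.drop_succ_cons, List.drop_zero] at *
        rw [ih rest [] (cur.reverse :: acc) (by simpa using h)]
        simp only [split1, if_pos rfl, List.reverse_nil, List.reverse_cons, List.nil_append]
        cases split1 x rest <;> simp
      · have hpre : [c].isPrefixOf (x :: rest) = false := by
          simp [List.isPrefixOf]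
          exact fun hh => hx hh.symm
        rw [PySem.Chars.splitOn.go]
        simp only [hpre, Bool.false_eq_true, if_false]
        rw [ih rest (x :: cur) acc (by simpa using Nat.le_of_succ_le_succ h)]
        simp only [split1, if_neg hx]
        cases split1 c rest <;> simp

theorem splitOn_single (c : Char) (l : List Char) :
    PySem.Chars.splitOn l [c] = split1 c l := by
  unfold PySem.Chars.splitOn
  rw [go_single c (l.length + 1) l [] [] (by omega)]
  cases hs : split1 c l <;> simp

theorem split1_ne_nil (c : Char) (l : List Char) : split1 c l ≠ [] := by
  induction l with
  | nil => simp [split1]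
  | cons x xs ih =>
    simp only [split1]
    split_ifs
    · simp
    · cases hs : split1 c xs <;> simp_all

theorem split1_length (c : Char) (l : List Char) :
    (split1 c l).length = l.count c + 1 := by
  induction l with
  | nil => simp [split1]
  | cons x xs ih =>
    by_cases hx : x = c
    · simp [split1, hx, ih]
    · simp [split1, hx, ih, List.length_modifyHead]

theorem split1_of_not_mem (c : Char) (l : List Char) (h : c ∉ l) : split1 c l = [l] := by
  induction l with
  | nil => simp [split1]
  | cons x xs ih =>
    simp only [List.mem_cons, not_or] at h
    simp [split1, Ne.symm h.1, ih h.2]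

/-- The part of a segment after its last dash. -/
def lastSeg : List Char → List Char
  | [] => []
  | x :: xs => if x = '-' then lastSeg xs else if '-' ∈ xs then lastSeg xs else x :: lastSeg xs

theorem lastSeg_of_not_mem (u : List Char) (h : '-' ∉ u) : lastSeg u = u := by
  induction u with
  | nil => rfl
  | cons x xs ih =>
    simp only [List.mem_cons, not_or] at h
    simp [lastSeg, Ne.symm h.1, h.2, ih h.2]

theorem getLast?_split1 (u : List Char) : (split1 '-' u).getLast? = some (lastSeg u) := by
  induction u with
  | nil => simp [split1, lastSeg]
  | cons x xs ih =>
    by_cases hx : x = '-'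
    · subst hx
      rcases hs : split1 '-' xs with _ | ⟨s0, S⟩
      · exact absurd hs (split1_ne_nil _ _)
      · rw [hs] at ih
        simp [split1, lastSeg, hs, List.getLast?_cons_cons, ih]
    · by_cases hm : '-' ∈ xs
      · rcases hs : split1 '-' xs with _ | ⟨s0, S⟩
        · exact absurd hs (split1_ne_nil _ _)
        · cases S with
          | nil =>
            have hlen := split1_length '-' xs
            rw [hs] at hlen
            simp at hlen
            have h0 : List.count '-' xs = 0 := by omega
            exact absurd hm (List.count_eq_zero.mp h0)
          | cons s1 S' =>
            rw [hs] at ih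
            simp only [split1, if_neg hx, hs, List.modifyHead,
              List.getLast?_cons_cons] at *
            simp [lastSeg, hx, hm, ih]
      · have hs := split1_of_not_mem '-' xs hm
        simp [split1, lastSeg, hx, hm, hs, lastSeg_of_not_mem _ hm]

theorem headI_split1 (c : Char) (l : List Char) :
    (split1 c l).headI = l.takeWhile (· != c) := by
  induction l with
  | nil => simp [split1]
  | cons x xs ih =>
    by_cases hx : x = c
    · simp [split1, hx, List.takeWhile_cons]
    · rcases hs : split1 c xs with _ | ⟨s0, S⟩
      · exact absurd hs (split1_ne_nil _ _)
      · rw [hs] at ih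
        simp only [List.headI] at ih
        simp [split1, hx, hs, List.takeWhile_cons, bne_iff_ne, ih]

/-- A's value as a function of the character list. -/
def aJoin (cs : List Char) : List Char :=
  PySem.Chars.join [',', ' '] ((split1 ',' cs).map lastSeg)

theorem join_cons_cons (sep x y : List Char) (xs : List (List Char)) :
    PySem.Chars.join sep (x :: y :: xs) = x ++ sep ++ PySem.Chars.join sep (y :: xs) := by
  simp [PySem.Chars.join, List.intercalate, List.intersperse]

theorem join_cons_head (sep x : List Char) (c : Char) (xs : List (List Char)) :
    PySem.Chars.join sep ((c :: x) :: xs) = c :: PySem.Chars.join sep (x :: xs) := by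
  cases xs with
  | nil => simp [PySem.Chars.join, List.intercalate]
  | cons y ys => rw [join_cons_cons, join_cons_cons]; simp

theorem aJoin_comma (cs : List Char) : aJoin (',' :: cs) = ',' :: ' ' :: aJoin cs := by
  unfold aJoin
  rcases hs : split1 ',' cs with _ | ⟨s0, S⟩
  · exact absurd hs (split1_ne_nil _ _)
  · simp only [split1, hs, eq_self_iff_true, if_true, List.map_cons]
    rw [join_cons_cons]
    simp [lastSeg]

theorem aJoin_seg (c : Char) (cs : List Char) (hc : c ≠ ',') :
    aJoin (c :: cs) =
      if c = '-' ∨ '-' ∈ cs.takeWhile (· != ',') then aJoin cs else c :: aJoin cs := by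
  unfold aJoin
  simp only [split1, if_neg hc]
  rcases hs : split1 ',' cs with _ | ⟨s0, S⟩
  · exact absurd hs (split1_ne_nil _ _)
  · have hhead : s0 = cs.takeWhile (· != ',') := by
      have := headI_split1 ',' cs; rw [hs] at this; simpa using this
    simp only [List.modifyHead, List.map_cons]
    have hlast : lastSeg (c :: s0) =
        if c = '-' ∨ '-' ∈ s0 then lastSeg s0 else c :: lastSeg s0 := by
      simp only [lastSeg]
      by_cases h1 : c = '-'
      · simp [h1]
      · by_cases h2 : '-' ∈ s0 <;> simp [h1, h2]
    rw [hlast, ← hhead]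
    split_ifs with h
    · rfl
    · rw [join_cons_head]

/-- B's kept characters, with `cur` the pending current-segment buffer. -/
def hB : List Char → List Char → List Char
  | cur, [] => cur
  | cur, c :: cs =>
    if c = ',' then cur ++ [',', ' '] ++ hB [] cs
    else if c = '-' then hB [] cs
    else hB (cur ++ [c]) cs

theorem foldB (cs : List Char) : ∀ (out cur : List Char),
    (cs.foldl pvStepB (out, cur)).1 ++ (cs.foldl pvStepB (out, cur)).2
      = out ++ hB cur cs := by
  induction cs with
  | nil => intro out cur; simp [hB]
  | cons c cs ih =>
    intro out cur
    simp only [List.foldl_cons, hB, pvStepB]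
    split_ifs with h1 h2 <;> simp [ih, List.append_assoc]

theorem hB_eq (cs : List Char) : ∀ (cur : List Char),
    hB cur cs = (if '-' ∈ cs.takeWhile (· != ',') then [] else cur) ++ aJoin cs := by
  induction cs with
  | nil =>
    intro cur
    simp [hB, aJoin, split1, lastSeg, PySem.Chars.join, List.intercalate]
  | cons c cs ih =>
    intro cur
    by_cases h1 : c = ','
    · subst h1
      simp only [hB, if_pos rfl]
      rw [ih, aJoin_comma]
      simp [List.takeWhile_cons]
    · by_cases h2 : c = '-'
      · subst h2
        have hne : ('-' : Char) ≠ ',' := by decide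
        simp only [hB, if_neg hne, if_pos rfl]
        rw [ih, aJoin_seg _ _ hne]
        simp [List.takeWhile_cons]
      · simp only [hB, if_neg h1, if_neg h2]
        rw [ih, aJoin_seg _ _ h1]
        have htw : (c :: cs).takeWhile (· != ',') = c :: cs.takeWhile (· != ',') := by
          simp [List.takeWhile_cons, bne_iff_ne, h1]
        rw [htw]
        have hmem : ('-' ∈ c :: cs.takeWhile (· != ',')) ↔ '-' ∈ cs.takeWhile (· != ',') := by
          simp [Ne.symm h2]
        by_cases h3 : '-' ∈ cs.takeWhile (· != ',') <;>
          simp [h2, h3, hmem]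

theorem alt_eq_aJoin (s : String) :
    remove_traits_alt s = String.ofList (aJoin s.toList) := by
  show String.ofList
      ((s.toList.foldl pvStepB ([], [])).1 ++ (s.toList.foldl pvStepB ([], [])).2)
    = String.ofList (aJoin s.toList)
  rw [foldB, hB_eq]
  simp

theorem foldl_app_singleton (f : List Char → List Char) :
    ∀ (S : List (List Char)) (acc : List (List Char)),
      S.foldl (fun a u => a ++ [f u]) acc = acc ++ S.map f := by
  intro S
  induction S with
  | nil => intro acc; simp
  | cons x xs ih => intro acc; simp [ih]

theorem a_eq_aJoin (s : String) (h : s ≠ "") :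
    remove_traits s = String.ofList (aJoin s.toList) := by
  unfold remove_traits
  rw [if_neg h]
  show String.ofList (PySem.Chars.join [',', ' ']
      ((PySem.Chars.splitOn s.toList [',']).foldl
        (fun acc unit =>
          acc ++ [PySem.List.pyGetD (PySem.Chars.splitOn unit ['-']) (-1) []]) []))
    = String.ofList (aJoin s.toList)
  have hpt : (fun unit => PySem.List.pyGetD (PySem.Chars.splitOn unit ['-']) (-1) [])
      = lastSeg := by
    funext u
    rw [splitOn_single]
    simp [PySem.List.pyGetD, PySem.List.pyGet?_neg_one, getLast?_split1]
  rw [foldl_app_singleton, hpt, splitOn_single]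
  rfl

-- ===== VERDICT (by name: the statement is the Claim_ definition above) =====
theorem remove_traits_spec : Claim_equal_remove_traits := by
  intro s _
  unfold Spec_remove_traits
  rw [alt_eq_aJoin]
  by_cases h : s = ""
  · subst h; rfl
  · exact a_eq_aJoin s h
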